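-- pv_equiv track=rewrite | github.com/blue-sky-r/Advent-Of-Code | 2023/08/u08.py | walk_to_XXZ
-- ===== SOURCE A (Python) =====
-- def walk_to_XXZ(map: dict, steps: str) -> list:
--     """ walk simultaniusly from act -> **Z """
--     length, stepidx = 0, 0
--     xxa = [node for node in map if node.endswith('A')]
--     # repeat untill all nodes end in **Z
--     while not all([ node.endswith('Z') for node in xxa ]):
--         # mode each node
--         step, stepidx = steps[stepidx], (stepidx + 1) % len(steps)
--         for idx,node in enumerate(xxa):
--             left, right = map[node]
--             if step == 'L':
--                 xxa[idx] = left
--             if step == 'R':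
--                 xxa[idx] = right
--         length += 1
--     return length
-- ===== SOURCE B (Python) =====
-- def walk_to_XXZ(map: dict, steps: str) -> list:
--     """Per-ghost Z-visit streams intersected by advancing the laggard."""
--     starts = [n for n in map if n.endswith('A')]
--     if not starts:
--         return 0
--     L = len(steps)
--
--     def next_z(node, t, lo):
--         # least time u >= lo at which this ghost (at `node` at time t) stands on a *Z node
--         while t < lo or not node.endswith('Z'):
--             left, right = map[node]
--             c = steps[t % L]
--             node = left if c == 'L' else right if c == 'R' else node
--             t += 1
--         return node, t
--
--     cur = [next_z(s, 0, 0) for s in starts]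
--     while True:
--         hi = max(t for _, t in cur)
--         if all(t == hi for _, t in cur):
--             return hi
--         cur = [next_z(node, t, hi) for node, t in cur]
-- ===== Notes on version B (the rewrite author's own statement) =====
-- stated objective: alternative
-- what changed: A advances all ghosts in lock-step, one map step per iteration, re-checking simultaneity after every step; B runs each ghost independently to its successive *Z-visit times and intersects these increasing time sequences by repeatedly advancing the laggards to the current maximum; Pre_ excludes exactly the inputs on which A raises (IndexError/KeyError/ValueError) or loops forever.
import Mathlib
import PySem

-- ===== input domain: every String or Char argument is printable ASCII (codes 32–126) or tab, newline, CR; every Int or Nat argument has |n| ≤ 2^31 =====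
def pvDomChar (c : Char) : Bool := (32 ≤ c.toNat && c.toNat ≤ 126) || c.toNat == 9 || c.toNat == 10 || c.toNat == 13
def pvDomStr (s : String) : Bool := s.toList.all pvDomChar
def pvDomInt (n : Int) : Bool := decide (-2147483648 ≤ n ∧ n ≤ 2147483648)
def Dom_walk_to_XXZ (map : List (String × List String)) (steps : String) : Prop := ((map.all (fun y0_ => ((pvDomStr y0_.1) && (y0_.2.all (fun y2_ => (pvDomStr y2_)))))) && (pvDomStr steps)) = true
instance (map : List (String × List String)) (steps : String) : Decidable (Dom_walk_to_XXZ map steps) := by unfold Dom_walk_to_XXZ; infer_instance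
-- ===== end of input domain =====

-- B replaces A's lock-step simulation of all ghosts (one time step per iteration, with a
-- simultaneity check after every step) by per-ghost runs: each ghost is advanced on its own
-- to its successive *Z-visit times, and these increasing time sequences are intersected by
-- repeatedly advancing the laggards to the current maximum ('alternative'; return value
-- only — neither implementation mutates its arguments).

-- shared by both ports and the specification layer ------------------------------------

def pvEndsA (s : String) : Bool := PySem.Str.endswith s "A"
def pvEndsZ (s : String) : Bool := PySem.Str.endswith s "Z"

-- a list comprehension over a function that can raise (none = the exception propagates)
def pvMapOpt {α β : Type} (f : α → Option β) : List α → Option (List β)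
  | [] => some []
  | x :: xs =>
    match f x, pvMapOpt f xs with
    | some y, some ys => some (y :: ys)
    | _, _ => none

-- totalising fuel for the ports' loops (the Python loops have none): an input-derived
-- bound that exceeds the number of distinct (ghost-positions, phase) states of the joint
-- walk, so by pigeonhole it exceeds the first all-Z time whenever the walk ever reaches one
def pvFuel (map : List (String × List String)) (steps : String) : Nat :=
  ((map.map Prod.fst ++ (map.map Prod.snd).flatten).dedup.length + 1)
      ^ (((PySem.Dict.ofList map).keys.filter pvEndsA).length)
    * (steps.toList.length + 1) + 2

-- ===== PORT A =====

-- the while loop: state (length, stepidx, xxa); where Python raises (steps[stepidx] on an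
-- empty string, map[node] missing, a value that is not a pair) the port keeps going with a
-- default — those inputs are outside Pre_, like fuel exhaustion (A loops forever there)
def pvALoop (d : PySem.Dict String (List String)) (stepsL : List Char) :
    Nat → Int → Int → List String → Int
  | 0, length, _, _ => length
  | f + 1, length, stepidx, xxa =>
    if (xxa.map pvEndsZ).all (fun b => b) then length
    else
      let step := (PySem.List.pyGet? stepsL stepidx).getD ' '
      let stepidx' := PySem.Int.mod (stepidx + 1) (stepsL.length : Int)
      let xxa' := xxa.map (fun node =>
        match d.get? node with
        | some [left, right] => if step = 'L' then left else if step = 'R' then right else node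
        | _ => node)
      pvALoop d stepsL f (length + 1) stepidx' xxa'

def walk_to_XXZ (map : List (String × List String)) (steps : String) : Int :=
  let d := PySem.Dict.ofList map
  let xxa := d.keys.filter pvEndsA
  pvALoop d steps.toList (pvFuel map steps) 0 0 xxa

-- ===== PORT B =====

-- next_z(node, t, lo): run this single ghost until the first time u ≥ lo with the node on
-- *Z; none = the Python raises (missing key / bad pair / empty steps) or loops forever
def pvNextZ (d : PySem.Dict String (List String)) (stepsL : List Char) :
    Nat → String → Nat → Nat → Option (String × Nat)
  | 0, _, _, _ => none
  | f + 1, node, t, lo =>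
    if lo ≤ t ∧ pvEndsZ node = true then some (node, t)
    else
      match d.get? node, stepsL[t % stepsL.length]? with
      | some [left, right], some c =>
          pvNextZ d stepsL f (if c = 'L' then left else if c = 'R' then right else node) (t + 1) lo
      | _, _ => none

-- the while True loop: advance every ghost to its next Z-time ≥ hi, stop when all agree
def pvBOuter (d : PySem.Dict String (List String)) (stepsL : List Char) :
    Nat → Nat → List (String × Nat) → Int
  | 0, _, _ => -1
  | f + 1, g, cur =>
    let hi := ((cur.map Prod.snd).max?).getD 0
    if cur.all (fun p => p.2 == hi) then (hi : Int)
    else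
      match pvMapOpt (fun p => pvNextZ d stepsL g p.1 p.2 hi) cur with
      | some cur' => pvBOuter d stepsL f g cur'
      | none => -1

def walk_to_XXZ_alt (map : List (String × List String)) (steps : String) : Int :=
  let d := PySem.Dict.ofList map
  let starts := d.keys.filter pvEndsA
  if starts.isEmpty then 0
  else
    match pvMapOpt (fun s => pvNextZ d steps.toList (pvFuel map steps) s 0 0) starts with
    | some cur0 => pvBOuter d steps.toList (starts.length * pvFuel map steps + 2) (pvFuel map steps) cur0
    | none => -1

-- ===== PRECONDITION & SPEC =====

-- one exception-free Python step of a single node at time t (none exactly where A raises: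
-- map[node] missing or not a pair, or steps[t % len(steps)] out of range i.e. steps = '')
def pvStep1 (d : PySem.Dict String (List String)) (L : List Char) (t : Nat) (node : String) :
    Option String :=
  match d.get? node, L[t % L.length]? with
  | some [l, r], some c => some (if c = 'L' then l else if c = 'R' then r else node)
  | _, _ => none

-- all ghosts' positions after t steps (none = some earlier step raised)
def pvReach (d : PySem.Dict String (List String)) (L : List Char) (starts : List String) :
    Nat → Option (List String)
  | 0 => some starts
  | t + 1 => (pvReach d L starts t).bind (pvMapOpt (pvStep1 d L t))

-- "at time t the walk is exception-free and every ghost stands on a *Z node"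
def pvPz (d : PySem.Dict String (List String)) (L : List Char) (starts : List String) (t : Nat) : Bool :=
  ((pvReach d L starts t).map (fun xs => xs.all pvEndsZ)).getD false

-- bounded searcher used only to DECIDE Pre_ (early exit on success and on exceptions)
def pvFindZ (d : PySem.Dict String (List String)) (L : List Char) :
    Nat → Nat → List String → Bool
  | 0, _, _ => false
  | f + 1, t, xs =>
    if xs.all pvEndsZ then true
    else
      match pvMapOpt (pvStep1 d L t) xs with
      | some xs' => pvFindZ d L f (t + 1) xs'
      | none => false

theorem pvReach_isSome_of_le (d : PySem.Dict String (List String)) (L : List Char)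
    (starts : List String) :
    ∀ t u, u ≤ t → (pvReach d L starts t).isSome → (pvReach d L starts u).isSome := by
  intro t
  induction t with
  | zero => intro u hu _; interval_cases u; simp [pvReach]
  | succ t ih =>
    intro u hu hs
    rcases Nat.lt_or_ge u (t + 1) with h | h
    · refine ih u (by omega) ?_
      rw [pvReach] at hs
      cases hr : pvReach d L starts t with
      | none => rw [hr] at hs; simp at hs
      | some xs => simp
    · have : u = t + 1 := by omega
      subst this; exact hs

theorem pvFindZ_iff (d : PySem.Dict String (List String)) (L : List Char)
    (starts : List String) :
    ∀ f t xs, pvReach d L starts t = some xs →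
      (pvFindZ d L f t xs = true ↔ ∃ u, u < t + f ∧ t ≤ u ∧ pvPz d L starts u = true) := by
  intro f
  induction f with
  | zero =>
    intro t xs _
    simp only [pvFindZ]
    constructor
    · intro h; simp at h
    · rintro ⟨u, h1, h2, _⟩; omega
  | succ f ih =>
    intro t xs hr
    rw [pvFindZ]
    by_cases hz : xs.all pvEndsZ = true
    · rw [if_pos hz]
      simp only [true_iff]
      exact ⟨t, by omega, le_refl t, by simp [pvPz, hr, hz]⟩
    · rw [if_neg hz]
      have hPzt : pvPz d L starts t = false := by
        simp only [pvPz, hr, Option.map_some, Option.getD_some]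
        simpa using hz
      cases hm : pvMapOpt (pvStep1 d L t) xs with
      | some xs' =>
        have hr' : pvReach d L starts (t + 1) = some xs' := by
          rw [pvReach, hr]; simpa using hm
        show pvFindZ d L f (t + 1) xs' = true ↔ _
        rw [ih (t + 1) xs' hr']
        constructor
        · rintro ⟨u, h1, h2, h3⟩; exact ⟨u, by omega, by omega, h3⟩
        · rintro ⟨u, h1, h2, h3⟩
          rcases Nat.eq_or_lt_of_le h2 with rfl | h
          · rw [h3] at hPzt; simp at hPzt
          · exact ⟨u, by omega, by omega, h3⟩
      | none =>
        show false = true ↔ _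
        simp only [Bool.false_eq_true, false_iff]
        rintro ⟨u, h1, h2, h3⟩
        have hne : (pvReach d L starts u).isSome := by
          unfold pvPz at h3
          cases hru : pvReach d L starts u with
          | none => rw [hru] at h3; simp at h3
          | some _ => simp
        rcases Nat.eq_or_lt_of_le h2 with rfl | hu
        · rw [h3] at hPzt; simp at hPzt
        · have := pvReach_isSome_of_le d L starts u (t + 1) hu hne
          rw [pvReach, hr] at this
          simp [hm] at this

-- Pre_ says exactly "A returns normally": at some time (within the pigeonhole-complete
-- bound pvFuel — the joint walk revisits a (positions, phase) state inside it, so no input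
-- on which A returns is excluded) the walk is still exception-free and every ghost node
-- ends in 'Z'.  Outside Pre_, A raises (IndexError / KeyError / ValueError) or loops
-- forever; A's termination admits no closed form over the raw input.
def Pre_walk_to_XXZ (map : List (String × List String)) (steps : String) : Prop :=
  ∃ t, t < pvFuel map steps ∧
    pvPz (PySem.Dict.ofList map) steps.toList
      ((PySem.Dict.ofList map).keys.filter pvEndsA) t = true

instance (map : List (String × List String)) (steps : String) :
    Decidable (Pre_walk_to_XXZ map steps) :=
  decidable_of_iff
    (pvFindZ (PySem.Dict.ofList map) steps.toList (pvFuel map steps) 0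
      ((PySem.Dict.ofList map).keys.filter pvEndsA) = true)
    (by
      rw [pvFindZ_iff _ _ _ _ 0 _ rfl]
      unfold Pre_walk_to_XXZ
      constructor
      · rintro ⟨u, h1, _, h3⟩; exact ⟨u, by omega, h3⟩
      · rintro ⟨u, h1, h3⟩; exact ⟨u, by omega, Nat.zero_le _, h3⟩)

def pvWitness_walk_to_XXZ : (List (String × List String)) × String :=
  ([("QA", ["QZ", "QZ"])], "L")

def Spec_walk_to_XXZ (map : List (String × List String)) (steps : String) (out : Int) : Prop := out = walk_to_XXZ_alt map steps
instance (map : List (String × List String)) (steps : String) (out : Int) : Decidable (Spec_walk_to_XXZ map steps out) := by unfold Spec_walk_to_XXZ; infer_instance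

-- ===== CLAIM (what is proved, stated in full; the proofs are below) =====
def Claim_equal_walk_to_XXZ : Prop := ∀ (map : List (String × List String)) (steps : String), Dom_walk_to_XXZ map steps → Pre_walk_to_XXZ map steps → Spec_walk_to_XXZ map steps (walk_to_XXZ map steps)

-- ===== LEMMAS AND PROOFS =====

-- one ghost's position after t steps
def pvGpos (d : PySem.Dict String (List String)) (L : List Char) (s : String) : Nat → Option String
  | 0 => some s
  | t + 1 => (pvGpos d L s t).bind (pvStep1 d L t)


theorem pvReach_nil (d : PySem.Dict String (List String)) (L : List Char) :
    ∀ t, pvReach d L [] t = some [] := by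
  intro t
  induction t with
  | zero => rfl
  | succ t ih => rw [pvReach, ih]; rfl

theorem pvReach_cons (d : PySem.Dict String (List String)) (L : List Char)
    (s : String) (rest : List String) :
    ∀ t, pvReach d L (s :: rest) t =
      match pvGpos d L s t, pvReach d L rest t with
      | some y, some ys => some (y :: ys)
      | _, _ => none := by
  intro t
  induction t with
  | zero => rfl
  | succ t ih =>
    rw [pvReach, ih, pvGpos, pvReach]
    cases hg : pvGpos d L s t with
    | none => rfl
    | some y =>
      cases hr : pvReach d L rest t with
      | none =>
        simp only [Option.bind_some, Option.bind_none]
        cases pvStep1 d L t y <;> rfl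
      | some ys =>
        simp only [Option.bind_some]
        rw [pvMapOpt]
        cases pvStep1 d L t y <;> cases pvMapOpt (pvStep1 d L t) ys <;> rfl

theorem pvGpos_isSome_of_le (d : PySem.Dict String (List String)) (L : List Char) (s : String) :
    ∀ t u, u ≤ t → (pvGpos d L s t).isSome → (pvGpos d L s u).isSome := by
  intro t
  induction t with
  | zero => intro u hu h; interval_cases u; exact h
  | succ t ih =>
    intro u hu hs
    rcases Nat.lt_or_ge u (t + 1) with h | h
    · refine ih u (by omega) ?_
      rw [pvGpos] at hs
      cases hg : pvGpos d L s t with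
      | none => rw [hg] at hs; simp at hs
      | some _ => simp
    · have : u = t + 1 := by omega
      subst this; exact hs

theorem pvReach_mem (d : PySem.Dict String (List String)) (L : List Char) :
    ∀ (starts : List String) (t : Nat) (xs : List String),
      pvReach d L starts t = some xs → ∀ s ∈ starts, ∃ y, pvGpos d L s t = some y ∧ y ∈ xs := by
  intro starts
  induction starts with
  | nil => intro t xs _ s hs; simp at hs
  | cons a rest ih =>
    intro t xs hr s hs
    rw [pvReach_cons] at hr
    cases hg : pvGpos d L a t with
    | none => rw [hg] at hr; simp at hr
    | some y =>
      cases hrr : pvReach d L rest t with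
      | none => rw [hg, hrr] at hr; simp at hr
      | some ys =>
        rw [hg, hrr] at hr
        simp only [Option.some.injEq] at hr
        subst hr
        rcases List.mem_cons.mp hs with rfl | hs'
        · exact ⟨y, hg, by simp⟩
        · obtain ⟨y', hy', hm⟩ := ih t ys hrr s hs'
          exact ⟨y', hy', by simp [hm]⟩

theorem pvReach_of_gpos (d : PySem.Dict String (List String)) (L : List Char) (t : Nat) :
    ∀ (starts xs : List String),
      List.Forall₂ (fun s x => pvGpos d L s t = some x) starts xs →
      pvReach d L starts t = some xs := by
  intro starts
  induction starts with
  | nil => intro xs h; cases h; exact pvReach_nil d L t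
  | cons a rest ih =>
    intro xs h
    cases h with
    | cons hax hrest =>
      rw [pvReach_cons, hax, ih _ hrest]

theorem pvModSucc (t n : Nat) : (t % n + 1) % n = (t + 1) % n := by
  conv_rhs => rw [Nat.add_mod]
  conv_lhs => rw [Nat.add_mod]
  simp

theorem pvAllMapEndsZ (xs : List String) :
    (xs.map pvEndsZ).all (fun b => b) = xs.all pvEndsZ := by
  simp [List.all_map]; rfl

theorem pvStep1_some (d : PySem.Dict String (List String)) (L : List Char) (t : Nat)
    (node y : String) (h : pvStep1 d L t node = some y) :
    ∃ l r c, d.get? node = some [l, r] ∧ L[t % L.length]? = some c ∧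
      y = if c = 'L' then l else if c = 'R' then r else node := by
  unfold pvStep1 at h
  cases hd : d.get? node with
  | none => rw [hd] at h; simp at h
  | some v =>
    rw [hd] at h
    cases hc : L[t % L.length]? with
    | none =>
      rcases v with _ | ⟨l, _ | ⟨r, _ | ⟨w, tl⟩⟩⟩ <;> rw [hc] at h <;> simp at h
    | some c =>
      rw [hc] at h
      rcases v with _ | ⟨l, _ | ⟨r, _ | ⟨w, tl⟩⟩⟩ <;> simp at h
      exact ⟨l, r, c, rfl, rfl, h.symm⟩

theorem pvAstep (d : PySem.Dict String (List String)) (L : List Char) (t : Nat) (c : Char)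
    (hc : L[t % L.length]? = some c) :
    ∀ xs xs', pvMapOpt (pvStep1 d L t) xs = some xs' →
      xs.map (fun node =>
        match d.get? node with
        | some [left, right] => if c = 'L' then left else if c = 'R' then right else node
        | _ => node) = xs' := by
  intro xs
  induction xs with
  | nil => intro xs' h; rw [pvMapOpt] at h; simpa using h.symm
  | cons a rest ih =>
    intro xs' h
    rw [pvMapOpt] at h
    cases hf : pvStep1 d L t a with
    | none => rw [hf] at h; simp at h
    | some y =>
      rw [hf] at h
      cases hm : pvMapOpt (pvStep1 d L t) rest with
      | none => rw [hm] at h; simp at h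
      | some ys =>
        rw [hm] at h
        simp only [Option.some.injEq] at h
        subst h
        obtain ⟨l, r, c', hd, hc', hy⟩ := pvStep1_some d L t a y hf
        rw [hc] at hc'
        simp only [Option.some.injEq] at hc'
        subst hc'
        simp only [List.map_cons, hd, ih ys hm]
        rw [hy]

theorem pvALoop_main (d : PySem.Dict String (List String)) (L : List Char)
    (starts : List String) (tZ : Nat)
    (hPz : pvPz d L starts tZ = true)
    (hmin : ∀ u, u < tZ → pvPz d L starts u = false) :
    ∀ f t xs, pvReach d L starts t = some xs → t ≤ tZ → tZ - t < f →
      pvALoop d L f (t : Int) ((t % L.length : Nat) : Int) xs = (tZ : Int) := by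
  intro f
  induction f with
  | zero => intro t xs _ _ h; omega
  | succ f ih =>
    intro t xs hr hle hf
    rw [pvALoop]
    by_cases hall : (xs.map pvEndsZ).all (fun b => b) = true
    · rw [if_pos hall]
      have hPzt : pvPz d L starts t = true := by
        rw [pvAllMapEndsZ] at hall
        simp [pvPz, hr, hall]
      have : t = tZ := by
        by_contra hne
        have := hmin t (by omega)
        rw [hPzt] at this; simp at this
      rw [this]
    · rw [if_neg hall]
      -- the loop really steps: t < tZ
      have hlt : t < tZ := by
        rcases Nat.eq_or_lt_of_le hle with rfl | h
        · exfalso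
          unfold pvPz at hPz
          rw [hr] at hPz
          simp only [Option.map_some, Option.getD_some] at hPz
          rw [pvAllMapEndsZ] at hall
          exact hall hPz
        · exact h
      have hrs : (pvReach d L starts (t + 1)).isSome := by
        refine pvReach_isSome_of_le d L starts tZ (t + 1) (by omega) ?_
        unfold pvPz at hPz
        cases hru : pvReach d L starts tZ with
        | none => rw [hru] at hPz; simp at hPz
        | some _ => simp
      rw [pvReach, hr] at hrs
      simp only [Option.bind_some] at hrs
      cases hm : pvMapOpt (pvStep1 d L t) xs with
      | none => rw [hm] at hrs; simp at hrs
      | some xs' =>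
        have hr' : pvReach d L starts (t + 1) = some xs' := by
          rw [pvReach, hr]; simpa using hm
        -- xs is nonempty (all [] = true), so the step character exists
        obtain ⟨x0, xrest, rfl⟩ : ∃ x0 xrest, xs = x0 :: xrest := by
          cases xs with
          | nil => exfalso; apply hall; simp
          | cons a b => exact ⟨a, b, rfl⟩
        obtain ⟨y0, hy0⟩ : ∃ y0, pvStep1 d L t x0 = some y0 := by
          rw [pvMapOpt] at hm
          cases hs0 : pvStep1 d L t x0 with
          | none => rw [hs0] at hm; simp at hm
          | some y => exact ⟨y, rfl⟩
        obtain ⟨l, r, c, _, hc, _⟩ := pvStep1_some d L t x0 y0 hy0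
        have hstep : (PySem.List.pyGet? L ((t % L.length : Nat) : Int)).getD ' ' = c := by
          rw [PySem.List.pyGet?_natCast, hc]; rfl
        have hidx : PySem.Int.mod (((t % L.length : Nat) : Int) + 1) (L.length : Int) =
            (((t + 1) % L.length : Nat) : Int) := by
          have h1 : (((t % L.length : Nat) : Int) + 1) = (((t % L.length + 1 : Nat)) : Int) := by
            push_cast; ring
          rw [h1, PySem.Int.mod_natCast, pvModSucc]
        simp only [hstep, hidx]
        rw [pvAstep d L t c hc _ xs' hm]
        have hlen : (t : Int) + 1 = ((t + 1 : Nat) : Int) := by push_cast; ring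
        rw [hlen]
        exact ih (t + 1) xs' hr' (by omega) (by omega)

-- invariant of B's outer loop: each current pair is a true Z-visit (position, time) of
-- its ghost, no later than the answer time tZ
def pvGood (d : PySem.Dict String (List String)) (L : List Char) (tZ : Nat)
    (s : String) (p : String × Nat) : Prop :=
  pvGpos d L s p.2 = some p.1 ∧ pvEndsZ p.1 = true ∧ p.2 ≤ tZ

theorem pvNextZ_sound (d : PySem.Dict String (List String)) (L : List Char)
    (s : String) (tZ : Nat)
    (hz : ∃ z, pvGpos d L s tZ = some z ∧ pvEndsZ z = true) :
    ∀ f t node lo, pvGpos d L s t = some node → t ≤ tZ → lo ≤ tZ → tZ - t < f →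
      ∃ nd u, pvNextZ d L f node t lo = some (nd, u) ∧
        pvGood d L tZ s (nd, u) ∧ t ≤ u ∧ lo ≤ u := by
  intro f
  induction f with
  | zero => intro t node lo _ _ _ h; omega
  | succ f ih =>
    intro t node lo hg hle hlo hf
    rw [pvNextZ]
    by_cases hstop : lo ≤ t ∧ pvEndsZ node = true
    · rw [if_pos hstop]
      exact ⟨node, t, rfl, ⟨hg, hstop.2, hle⟩, le_refl t, hstop.1⟩
    · rw [if_neg hstop]
      have hlt : t < tZ := by
        rcases Nat.eq_or_lt_of_le hle with rfl | h
        · exfalso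
          obtain ⟨z, hz1, hz2⟩ := hz
          rw [hg] at hz1
          simp only [Option.some.injEq] at hz1
          subst hz1
          exact hstop ⟨hlo, hz2⟩
        · exact h
      have hs1 : (pvGpos d L s (t + 1)).isSome := by
        refine pvGpos_isSome_of_le d L s tZ (t + 1) (by omega) ?_
        obtain ⟨z, hz1, _⟩ := hz
        rw [hz1]; simp
      rw [pvGpos, hg] at hs1
      simp only [Option.bind_some] at hs1
      cases hstep : pvStep1 d L t node with
      | none => rw [hstep] at hs1; simp at hs1
      | some node' =>
        obtain ⟨l, r, c, hd, hc, hy⟩ := pvStep1_some d L t node node' hstep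
        rw [hd, hc]
        have hg' : pvGpos d L s (t + 1) = some node' := by
          rw [pvGpos, hg]; simpa using hstep
        show ∃ nd u, pvNextZ d L f (if c = 'L' then l else if c = 'R' then r else node)
            (t + 1) lo = some (nd, u) ∧ pvGood d L tZ s (nd, u) ∧ t ≤ u ∧ lo ≤ u
        rw [← hy]
        obtain ⟨nd, u, h1, h2, h3, h4⟩ := ih (t + 1) node' lo hg' (by omega) hlo (by omega)
        exact ⟨nd, u, h1, h2, by omega, h4⟩

-- the list comprehension over a raising per-element function, with relations carried along
theorem pvMapOpt_forall₂ {α β γ : Type} (f : β → Option γ) (R : α → β → Prop)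
    (S : α → γ → Prop) (T : β → γ → Prop) :
    ∀ (l : List α) (l' : List β), List.Forall₂ R l l' →
      (∀ a b, R a b → ∃ cc, f b = some cc ∧ S a cc ∧ T b cc) →
      ∃ l'', pvMapOpt f l' = some l'' ∧ List.Forall₂ S l l'' ∧ List.Forall₂ T l' l'' := by
  intro l
  induction l with
  | nil =>
    intro l' h _
    cases h
    exact ⟨[], rfl, List.Forall₂.nil, List.Forall₂.nil⟩
  | cons a rest ih =>
    intro l' h hstep
    cases h with
    | cons hab hrest =>
      rename_i b l'
      obtain ⟨cc, hf, hS, hT⟩ := hstep a b hab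
      obtain ⟨l'', h1, h2, h3⟩ := ih _ hrest hstep
      refine ⟨cc :: l'', ?_, List.Forall₂.cons hS h2, List.Forall₂.cons hT h3⟩
      rw [pvMapOpt, hf, h1]

theorem pvSumLe : ∀ (l l' : List (String × Nat)),
    List.Forall₂ (fun p q => p.2 ≤ q.2) l l' →
    (l.map Prod.snd).sum ≤ (l'.map Prod.snd).sum := by
  intro l
  induction l with
  | nil => intro l' h; cases h; simp
  | cons a rest ih =>
    intro l' h
    cases h with
    | cons hab hrest =>
      simp only [List.map_cons, List.sum_cons]
      have := ih _ hrest
      omega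

theorem pvSumLt (hi : Nat) : ∀ (l l' : List (String × Nat)),
    List.Forall₂ (fun p q => p.2 ≤ q.2 ∧ hi ≤ q.2) l l' →
    ∀ p ∈ l, p.2 < hi → (l.map Prod.snd).sum < (l'.map Prod.snd).sum := by
  intro l
  induction l with
  | nil => intro l' _ p hp; simp at hp
  | cons a rest ih =>
    intro l' h p hp hplt
    cases h with
    | cons hab hrest =>
      rename_i b l'
      simp only [List.map_cons, List.sum_cons]
      have hle : (rest.map Prod.snd).sum ≤ (l'.map Prod.snd).sum :=
        pvSumLe rest l' (List.Forall₂.imp (fun _ _ hpq => hpq.1) hrest)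
      rcases List.mem_cons.mp hp with rfl | hp'
      · have : hi ≤ b.2 := hab.2
        omega
      · have := ih l' hrest p hp' hplt
        omega

theorem pvSumBound (tZ : Nat) : ∀ (starts : List String) (cur : List (String × Nat)),
    List.Forall₂ (fun (_ : String) (p : String × Nat) => p.2 ≤ tZ) starts cur →
    (cur.map Prod.snd).sum ≤ starts.length * tZ := by
  intro starts
  induction starts with
  | nil => intro cur h; cases h; simp
  | cons a rest ih =>
    intro cur h
    cases h with
    | cons hab hrest =>
      simp only [List.map_cons, List.sum_cons, List.length_cons]
      have := ih _ hrest
      have h2 : (rest.length + 1) * tZ = rest.length * tZ + tZ := by ring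
      omega

theorem pvGpos_of_forall₂_hi (d : PySem.Dict String (List String)) (L : List Char)
    (tZ hi : Nat) : ∀ (starts : List String) (cur : List (String × Nat)),
    List.Forall₂ (pvGood d L tZ) starts cur → (∀ p ∈ cur, p.2 = hi) →
    List.Forall₂ (fun s x => pvGpos d L s hi = some x) starts (cur.map Prod.fst) ∧
      (cur.map Prod.fst).all pvEndsZ = true := by
  intro starts
  induction starts with
  | nil => intro cur h _; cases h; exact ⟨List.Forall₂.nil, rfl⟩
  | cons a rest ih =>
    intro cur h hhi
    cases h with
    | cons hab hrest =>
      rename_i p cur'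
      obtain ⟨ih1, ih2⟩ := ih cur' hrest (fun q hq => hhi q (by simp [hq]))
      have hp2 : p.2 = hi := hhi p (by simp)
      refine ⟨List.Forall₂.cons ?_ ih1, ?_⟩
      · rw [← hp2]; exact hab.1
      · simp only [List.map_cons, List.all_cons, ih2, Bool.and_true]
        exact hab.2.1

theorem pvForall₂_mem_right {α β : Type} {R : α → β → Prop} :
    ∀ (l : List α) (l' : List β), List.Forall₂ R l l' → ∀ b ∈ l', ∃ a ∈ l, R a b := by
  intro l
  induction l with
  | nil => intro l' h b hb; cases h; simp at hb
  | cons a rest ih =>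
    intro l' h b hb
    cases h with
    | cons hab hrest =>
      rcases List.mem_cons.mp hb with rfl | hb'
      · exact ⟨a, by simp, hab⟩
      · obtain ⟨a', ha', hr⟩ := ih _ hrest b hb'
        exact ⟨a', by simp [ha'], hr⟩

theorem pvForall₂_mem_left {α β : Type} {R : α → β → Prop} :
    ∀ (l : List α) (l' : List β), List.Forall₂ R l l' →
      List.Forall₂ (fun a b => a ∈ l ∧ R a b) l l' := by
  intro l
  induction l with
  | nil => intro l' h; cases h; exact List.Forall₂.nil
  | cons a rest ih =>
    intro l' h
    cases h with
    | cons hab hrest =>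
      refine List.Forall₂.cons ⟨by simp, hab⟩ ?_
      exact (ih _ hrest).imp (fun x y hxy => ⟨by simp [hxy.1], hxy.2⟩)

theorem pvBOuter_main (d : PySem.Dict String (List String)) (L : List Char)
    (starts : List String) (tZ F : Nat)
    (hleast : ∀ u, pvPz d L starts u = true → tZ ≤ u)
    (hGZ : ∀ s ∈ starts, ∃ z, pvGpos d L s tZ = some z ∧ pvEndsZ z = true)
    (hne : starts ≠ [])
    (hF : tZ < F) :
    ∀ f cur, List.Forall₂ (pvGood d L tZ) starts cur →
      starts.length * tZ + 1 ≤ f + (cur.map Prod.snd).sum →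
      pvBOuter d L f F cur = (tZ : Int) := by
  intro f
  induction f with
  | zero =>
    intro cur hinv hm
    exfalso
    have := pvSumBound tZ starts cur (List.Forall₂.imp (fun _ _ h => h.2.2) hinv)
    omega
  | succ f ih =>
    intro cur hinv hm
    rw [pvBOuter]
    have hcurne : cur ≠ [] := by
      intro hc
      subst hc
      cases hinv
      exact hne rfl
    obtain ⟨hi, hmax⟩ : ∃ hi, (cur.map Prod.snd).max? = some hi := by
      cases hmx : (cur.map Prod.snd).max? with
      | none =>
        rw [List.max?_eq_none_iff] at hmx
        simp only [List.map_eq_nil_iff] at hmx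
        exact absurd hmx hcurne
      | some hi => exact ⟨hi, rfl⟩
    rw [hmax]
    simp only [Option.getD_some]
    have hmax' := hmax
    rw [List.max?_eq_some_iff] at hmax'
    obtain ⟨hi_mem, hi_max⟩ := hmax'
    have hi_mem' : ∃ p ∈ cur, p.2 = hi := by
      obtain ⟨p, hp, hp2⟩ := List.mem_map.mp hi_mem
      exact ⟨p, hp, hp2⟩
    have hi_le_tZ : hi ≤ tZ := by
      obtain ⟨p, hp, hp2⟩ := hi_mem'
      obtain ⟨a, _, hg⟩ := pvForall₂_mem_right starts cur hinv p hp
      rw [← hp2]; exact hg.2.2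
    by_cases hall : cur.all (fun p => p.2 == hi) = true
    · rw [if_pos hall]
      have hhi : ∀ p ∈ cur, p.2 = hi := by
        intro p hp
        have := List.all_eq_true.mp hall p hp
        simpa using this
      obtain ⟨hfa, hallz⟩ := pvGpos_of_forall₂_hi d L tZ hi starts cur hinv hhi
      have hPhi : pvPz d L starts hi = true := by
        unfold pvPz
        rw [pvReach_of_gpos d L hi starts _ hfa]
        simpa using hallz
      have h1 := hleast hi hPhi
      have h2 : hi = tZ := by omega
      rw [h2]
    · rw [if_neg hall]
      obtain ⟨q, hq, hqlt⟩ : ∃ q ∈ cur, q.2 < hi := by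
        rcases List.exists_mem_of_ne_nil cur hcurne with ⟨-, -⟩
        have : ¬ ∀ p ∈ cur, (p.2 == hi) = true := fun hcon => hall (List.all_eq_true.mpr hcon)
        push Not at this
        obtain ⟨p, hp, hpne⟩ := this
        refine ⟨p, hp, ?_⟩
        have hle : p.2 ≤ hi := hi_max _ (List.mem_map.mpr ⟨p, hp, rfl⟩)
        have : p.2 ≠ hi := by simpa using hpne
        omega
      obtain ⟨cur', hmap, hinv', hT⟩ :=
        pvMapOpt_forall₂ (fun p => pvNextZ d L F p.1 p.2 hi)
          (fun a b => a ∈ starts ∧ pvGood d L tZ a b) (pvGood d L tZ)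
          (fun b cc => b.2 ≤ cc.2 ∧ hi ≤ cc.2) starts cur
          (pvForall₂_mem_left starts cur hinv)
          (by
            rintro a b ⟨hmem, hgood⟩
            obtain ⟨nd, u, h1, h2, h3, h4⟩ :=
              pvNextZ_sound d L a tZ (hGZ a hmem) F b.2 b.1 hi hgood.1 hgood.2.2
                hi_le_tZ (by omega)
            exact ⟨(nd, u), h1, h2, h3, h4⟩)
      rw [hmap]
      refine ih cur' hinv' ?_
      have hsum : (cur.map Prod.snd).sum < (cur'.map Prod.snd).sum :=
        pvSumLt hi cur cur' hT q hq hqlt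
      omega

theorem pvGZ_of_Pz (d : PySem.Dict String (List String)) (L : List Char)
    (starts : List String) (tZ : Nat) (hPz : pvPz d L starts tZ = true) :
    ∀ s ∈ starts, ∃ z, pvGpos d L s tZ = some z ∧ pvEndsZ z = true := by
  intro s hs
  unfold pvPz at hPz
  cases hru : pvReach d L starts tZ with
  | none => rw [hru] at hPz; simp at hPz
  | some xs =>
    rw [hru] at hPz
    simp only [Option.map_some, Option.getD_some] at hPz
    obtain ⟨y, hy, hmem⟩ := pvReach_mem d L starts tZ xs hru s hs
    exact ⟨y, hy, List.all_eq_true.mp hPz y hmem⟩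

-- ===== VERDICT (by name: the statement is the Claim_ definition above) =====
theorem walk_to_XXZ_spec : Claim_equal_walk_to_XXZ := by
  unfold Claim_equal_walk_to_XXZ
  intro map steps _hdom hpre
  unfold Spec_walk_to_XXZ walk_to_XXZ walk_to_XXZ_alt
  obtain ⟨t0, ht0F, ht0⟩ := hpre
  set d := PySem.Dict.ofList map with hd
  set L := steps.toList with hL
  set starts := d.keys.filter pvEndsA with hstarts
  have hex : ∃ t, pvPz d L starts t = true := ⟨t0, ht0⟩
  set tZ := Nat.find hex with htZdef
  have hPz : pvPz d L starts tZ = true := Nat.find_spec hex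
  have hmin : ∀ u, u < tZ → pvPz d L starts u = false := by
    intro u hu
    have := Nat.find_min hex hu
    simpa using this
  have hleast : ∀ u, pvPz d L starts u = true → tZ ≤ u := fun u hu => Nat.find_min' hex hu
  have htZF : tZ < pvFuel map steps := by
    have := Nat.find_min' hex ht0
    omega
  have hA : pvALoop d L (pvFuel map steps) 0 0 starts = (tZ : Int) := by
    have := pvALoop_main d L starts tZ hPz hmin (pvFuel map steps) 0 starts rfl
      (by omega) (by omega)
    simpa using this
  rw [hA]
  by_cases hempty : starts.isEmpty
  · rw [if_pos hempty]
    have hnil : starts = [] := List.isEmpty_iff.mp hempty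
    have h0 : pvPz d L starts 0 = true := by rw [hnil]; rfl
    have : tZ = 0 := Nat.le_zero.mp (hleast 0 h0)
    rw [this]
    rfl
  · rw [if_neg hempty]
    have hstartsne : starts ≠ [] := by simpa [List.isEmpty_iff] using hempty
    have hGZ := pvGZ_of_Pz d L starts tZ hPz
    obtain ⟨cur0, hmap0, hinv0, -⟩ :=
      pvMapOpt_forall₂ (fun s => pvNextZ d L (pvFuel map steps) s 0 0)
        (fun a b => a ∈ starts ∧ a = b) (pvGood d L tZ) (fun _ _ => True)
        starts starts
        (List.forall₂_same.mpr (fun a ha => ⟨ha, rfl⟩))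
        (by
          rintro a b ⟨hmem, rfl⟩
          obtain ⟨nd, u, h1, h2, -, -⟩ :=
            pvNextZ_sound d L a tZ (hGZ a hmem) (pvFuel map steps) 0 a 0 rfl
              (Nat.zero_le _) (Nat.zero_le _) (by omega)
          exact ⟨(nd, u), h1, h2, trivial⟩)
    rw [hmap0, ← hstarts]
    exact (pvBOuter_main d L starts tZ (pvFuel map steps) hleast hGZ hstartsne htZF
      (starts.length * pvFuel map steps + 2) cur0 hinv0 (by
        have hmul : starts.length * tZ ≤ starts.length * pvFuel map steps :=
          Nat.mul_le_mul_left starts.length (le_of_lt htZF)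
        omega)).symm
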